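-- pv_equiv track=rewrite | github.com/ArtyomKaltovich/some_algorithms | tree_depth.py | depth2
-- ===== SOURCE A (Python) =====
-- def depth2(tree):
--     roots = set()
--     roots.add(-1)
--     result = -1
--     while roots:
--         result += 1
--         children = set()
--         for r in roots:
--             for elem, parent in enumerate(tree):
--                 if parent == r:
--                     children.add(elem)
--         roots = children
--     return result
-- ===== SOURCE B (Python) =====
-- def depth2(tree):
--     n = len(tree)
--     state = [0] * n          # 0 unknown; d >= 1 depth of node; -1 cannot reach the root
--     best = 0
--     for i in range(n):
--         path = []
--         seen = set()
--         cur = i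
--         while 0 <= cur < n and state[cur] == 0 and cur not in seen and len(path) <= n:
--             seen.add(cur)
--             path.append(cur)
--             cur = tree[cur]
--         if cur == -1:
--             d = 0
--         elif 0 <= cur < n and state[cur] > 0:
--             d = state[cur]
--         else:
--             d = -1           # junk parent value, cycle, or known-unreachable node
--         for node in reversed(path):
--             if d >= 0:
--                 d += 1
--             state[node] = d
--         if state[i] > 0:
--             best = max(best, state[i])
--     return best
-- ===== Notes on version B (the rewrite author's own statement) =====
-- stated objective: alternative
-- what changed: A does a level-synchronous top-down BFS, rescanning the whole parent array once per root of every level; B walks each node's parent chain upward once with a memo array (depth or known-unreachable per node), so every node is resolved at most once, and takes the maximum depth.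
import Mathlib
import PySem

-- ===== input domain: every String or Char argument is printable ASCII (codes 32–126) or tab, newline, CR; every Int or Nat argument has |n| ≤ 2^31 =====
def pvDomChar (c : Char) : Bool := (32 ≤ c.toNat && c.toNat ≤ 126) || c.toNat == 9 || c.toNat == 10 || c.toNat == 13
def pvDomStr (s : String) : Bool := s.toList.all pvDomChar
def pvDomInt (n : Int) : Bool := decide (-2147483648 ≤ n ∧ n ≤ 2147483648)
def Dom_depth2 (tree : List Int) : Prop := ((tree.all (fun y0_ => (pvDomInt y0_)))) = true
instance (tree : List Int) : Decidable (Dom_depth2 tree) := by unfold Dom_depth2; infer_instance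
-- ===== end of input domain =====

-- B replaces A's level-synchronous top-down BFS (rescan of the whole array per root of every
-- level) by a memoized upward parent-chain walk per node, taking the maximum depth found.

-- ===== PORT A =====
-- children = set(); for r in roots: for elem, parent in enumerate(tree): if parent == r: children.add(elem)
def depth2Children (tree : List Int) (roots : PySem.Set Int) : PySem.Set Int :=
  roots.foldl (fun children r =>
    (PySem.List.enumerate tree).foldl (fun children ep =>
      if ep.2 == r then PySem.Set.add children ep.1 else children) children)
    PySem.Set.empty

-- while roots: result += 1; … ; roots = children   (fuel tree.length + 2, proven sufficient:
-- every level index carrying a node is at most tree.length, see levelp_le below)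
def depth2Loop (tree : List Int) (roots : PySem.Set Int) (result : Int) : Nat → Int
  | 0 => result
  | fuel + 1 =>
    if roots.isEmpty then result
    else depth2Loop tree (depth2Children tree roots) (result + 1) fuel

def depth2 (tree : List Int) : Int :=
  depth2Loop tree (PySem.Set.add PySem.Set.empty (-1)) (-1) (tree.length + 2)

-- ===== PORT B =====
-- while 0 <= cur < n and state[cur] == 0 and cur not in seen and len(path) <= n:
--     seen.add(cur); path.append(cur); cur = tree[cur]
def depth2AltWalk (tree state : List Int) (cur : Int) (path : List Int) (seen : PySem.Set Int) :
    Int × List Int :=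
  if _h : 0 ≤ cur ∧ cur < tree.length ∧ PySem.List.pyGetD state cur 0 = 0 ∧
      cur ∉ seen ∧ path.length ≤ tree.length then
    depth2AltWalk tree state (PySem.List.pyGetD tree cur 0) (path ++ [cur])
      (PySem.Set.add seen cur)
  else (cur, path)
termination_by tree.length + 1 - path.length
decreasing_by simp only [List.length_append, List.length_cons, List.length_nil]; omega

-- the body of 'for i in range(n)': walk, classify the end, write the results back, update best
def depth2AltBody (tree : List Int) (sb : List Int × Int) (i : Nat) : List Int × Int :=
  let w := depth2AltWalk tree sb.1 (i : Int) [] PySem.Set.empty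
  let d : Int :=
    if w.1 = -1 then 0
    else if 0 ≤ w.1 ∧ w.1 < tree.length ∧ 0 < PySem.List.pyGetD sb.1 w.1 0 then
      PySem.List.pyGetD sb.1 w.1 0
    else -1
  let st := (w.2.reverse.foldl (fun (sd : List Int × Int) node =>
      let d2 := if 0 ≤ sd.2 then sd.2 + 1 else sd.2
      (PySem.List.pySetD sd.1 node d2, d2)) (sb.1, d)).1
  let si := PySem.List.pyGetD st (i : Int) 0
  (st, if 0 < si then max sb.2 si else sb.2)

def depth2_alt (tree : List Int) : Int :=
  ((List.range tree.length).foldl (depth2AltBody tree) (List.replicate tree.length 0, 0)).2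

-- ===== PRECONDITION & SPEC =====
def Spec_depth2 (tree : List Int) (out : Int) : Prop := out = depth2_alt tree
instance (tree : List Int) (out : Int) : Decidable (Spec_depth2 tree out) := by unfold Spec_depth2; infer_instance

-- ===== CLAIM (what is proved, stated in full; the proofs are below) =====
def Claim_equal_depth2 : Prop := ∀ (tree : List Int), Dom_depth2 tree → Spec_depth2 tree (depth2 tree)

-- ===== LEMMAS AND PROOFS =====

-- One parent-pointer step: indices inside the array move to their parent, everything else
-- (-1 and junk parent values) is absorbing.
def tstep (tree : List Int) (x : Int) : Int :=
  if 0 ≤ x ∧ x < tree.length then PySem.List.pyGetD tree x 0 else x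

-- `levelp tree x k`: following parent pointers from x reaches -1 after exactly k steps.
def levelp (tree : List Int) (x : Int) (k : Nat) : Prop :=
  (tstep tree)^[k] x = -1 ∧ ∀ j < k, (tstep tree)^[j] x ≠ -1

lemma tstep_out {tree : List Int} {x : Int} (h : ¬ (0 ≤ x ∧ x < tree.length)) :
    tstep tree x = x := by simp [tstep, h]

lemma iterate_out {tree : List Int} {x : Int} (h : ¬ (0 ≤ x ∧ x < tree.length)) (m : Nat) :
    (tstep tree)^[m] x = x := by
  induction m with
  | zero => rfl
  | succ m ih => rw [Function.iterate_succ_apply, tstep_out h, ih]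

lemma levelp_zero {tree : List Int} {x : Int} : levelp tree x 0 ↔ x = -1 := by
  simp [levelp]

lemma levelp_succ {tree : List Int} {x : Int} {k : Nat} :
    levelp tree x (k + 1) ↔ x ≠ -1 ∧ levelp tree (tstep tree x) k := by
  constructor
  · rintro ⟨h1, h2⟩
    refine ⟨h2 0 (by omega), ?_, ?_⟩
    · rw [← Function.iterate_succ_apply]; exact h1
    · intro j hj
      rw [← Function.iterate_succ_apply]
      exact h2 (j + 1) (by omega)
  · rintro ⟨hx, h1, h2⟩
    refine ⟨by rw [Function.iterate_succ_apply]; exact h1, ?_⟩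
    intro j hj
    cases j with
    | zero => exact hx
    | succ j => rw [Function.iterate_succ_apply]; exact h2 j (by omega)

lemma levelp_in_range {tree : List Int} {x : Int} {k : Nat}
    (h : levelp tree x k) (hk : 0 < k) : 0 ≤ x ∧ x < tree.length := by
  by_contra hout
  have hx : x ≠ -1 := h.2 0 hk
  have := iterate_out hout k
  exact hx (by rw [← this]; exact h.1)

lemma levelp_iter_in_range {tree : List Int} {x : Int} {k : Nat}
    (h : levelp tree x k) {j : Nat} (hj : j < k) :
    0 ≤ (tstep tree)^[j] x ∧ (tstep tree)^[j] x < tree.length := by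
  by_contra hout
  have h1 := h.1
  have heq : (tstep tree)^[k] x = (tstep tree)^[j] x := by
    have hk : k = (k - j) + j := by omega
    rw [hk, Function.iterate_add_apply, iterate_out hout]
  exact h.2 j hj (by rw [← heq]; exact h1)

lemma levelp_le {tree : List Int} {x : Int} {k : Nat} (h : levelp tree x k) :
    k ≤ tree.length := by
  by_contra hgt
  have key : ∀ a b : Nat, a < b → b < k →
      (tstep tree)^[a] x = (tstep tree)^[b] x → False := by
    intro a b hlt hbk hab
    apply h.2 ((k - b) + a) (by omega)
    rw [Function.iterate_add_apply, hab, ← Function.iterate_add_apply]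
    have hkb : k - b + b = k := by omega
    rw [hkb]; exact h.1
  have hinj : Set.InjOn (fun j : Nat => (tstep tree)^[j] x) (Finset.range k) := by
    intro a ha b hb hab
    simp only [Finset.coe_range, Set.mem_Iio] at ha hb
    simp only at hab
    by_contra hne
    rcases Nat.lt_or_ge a b with hlt | hge
    · exact key a b hlt hb hab
    · exact key b a (by omega) ha hab.symm
  have hmap : ∀ j ∈ Finset.range k, (tstep tree)^[j] x ∈ Finset.Ico (0 : Int) tree.length := by
    intro j hj
    simp only [Finset.mem_range] at hj
    simpa only [Finset.mem_Ico] using levelp_iter_in_range h hj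
  have hcard := Finset.card_le_card_of_injOn _ hmap hinj
  rw [Finset.card_range, Int.card_Ico] at hcard
  omega

-- `S tree m`: some chain reaches -1 in exactly m steps (m = 0 is witnessed by -1 itself)
def S (tree : List Int) (m : Nat) : Prop := ∃ x, levelp tree x m

noncomputable def maxLvl (tree : List Int) : Nat :=
  @Nat.findGreatest (S tree) (fun _ => Classical.dec _) tree.length

lemma S_zero (tree : List Int) : S tree 0 := ⟨-1, levelp_zero.mpr rfl⟩

lemma S_le {tree : List Int} {m : Nat} (h : S tree m) : m ≤ maxLvl tree := by
  obtain ⟨x, hx⟩ := h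
  exact @Nat.le_findGreatest m (S tree) (fun _ => Classical.dec _) tree.length
    (levelp_le hx) ⟨x, hx⟩

lemma maxLvl_le (tree : List Int) : maxLvl tree ≤ tree.length :=
  @Nat.findGreatest_le (S tree) (fun _ => Classical.dec _) tree.length

lemma S_down {tree : List Int} {m : Nat} (h : S tree (m + 1)) : S tree m := by
  obtain ⟨x, hx⟩ := h
  exact ⟨tstep tree x, (levelp_succ.mp hx).2⟩

lemma S_maxLvl (tree : List Int) : S tree (maxLvl tree) :=
  @Nat.findGreatest_spec 0 (S tree) (fun _ => Classical.dec _) tree.length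
    (Nat.zero_le _) (S_zero tree)

lemma S_of_le {tree : List Int} {m : Nat} (h : m ≤ maxLvl tree) : S tree m := by
  have hall : ∀ d m' : Nat, S tree (m' + d) → S tree m' := by
    intro d
    induction d with
    | zero => intro m' h'; exact h'
    | succ d ih => intro m' h'; exact ih m' (S_down (by rwa [Nat.add_succ] at h'))
  have : maxLvl tree = m + (maxLvl tree - m) := by omega
  exact hall (maxLvl tree - m) m (by rw [← this]; exact S_maxLvl tree)

lemma not_S_of_gt {tree : List Int} {m : Nat} (h : maxLvl tree < m) : ¬ S tree m := by
  intro hS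
  exact absurd (S_le hS) (by omega)

-- membership in the inner fold over enumerate
lemma mem_inner_fold (r : Int) (y : Int) :
    ∀ (l : List (Int × Int)) (acc : PySem.Set Int),
      (y ∈ l.foldl (fun children ep =>
        if ep.2 == r then PySem.Set.add children ep.1 else children) acc
      ↔ y ∈ acc ∨ ∃ p ∈ l, p.2 = r ∧ y = p.1) := by
  intro l
  induction l with
  | nil => simp
  | cons p l ih =>
    intro acc
    simp only [List.foldl_cons, List.mem_cons]
    by_cases hp : p.2 = r
    · rw [if_pos (show (p.2 == r) = true by simp [hp])]
      simp only [ih, PySem.Set.mem_add]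
      constructor
      · rintro ((h | h) | ⟨q, hq, h1, h2⟩)
        · exact Or.inl h
        · exact Or.inr ⟨p, Or.inl rfl, hp, h⟩
        · exact Or.inr ⟨q, Or.inr hq, h1, h2⟩
      · rintro (h | ⟨q, hq | hq, h1, h2⟩)
        · exact Or.inl (Or.inl h)
        · subst hq; exact Or.inl (Or.inr h2)
        · exact Or.inr ⟨q, hq, h1, h2⟩
    · rw [if_neg (show ¬ (p.2 == r) = true by simp [hp])]
      simp only [ih]
      constructor
      · rintro (h | ⟨q, hq, h1, h2⟩)
        · exact Or.inl h
        · exact Or.inr ⟨q, Or.inr hq, h1, h2⟩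
      · rintro (h | ⟨q, hq | hq, h1, h2⟩)
        · exact Or.inl h
        · subst hq; exact absurd h1 hp
        · exact Or.inr ⟨q, hq, h1, h2⟩

lemma mem_children_iff (tree : List Int) (roots : PySem.Set Int) (y : Int) :
    y ∈ depth2Children tree roots ↔
      ∃ p ∈ PySem.List.enumerate tree, p.2 ∈ roots ∧ y = p.1 := by
  unfold depth2Children
  have main : ∀ (rs : List Int) (acc : PySem.Set Int),
      (y ∈ rs.foldl (fun children r =>
        (PySem.List.enumerate tree).foldl (fun children ep =>
          if ep.2 == r then PySem.Set.add children ep.1 else children) children) acc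
      ↔ y ∈ acc ∨ ∃ r ∈ rs, ∃ p ∈ PySem.List.enumerate tree, p.2 = r ∧ y = p.1) := by
    intro rs
    induction rs with
    | nil => simp
    | cons r rs ih =>
      intro acc
      simp only [List.foldl_cons, ih, mem_inner_fold, List.mem_cons]
      constructor
      · rintro (((h | ⟨p, hp, h1, h2⟩) | ⟨r', hr', hrest⟩))
        · exact Or.inl h
        · exact Or.inr ⟨r, Or.inl rfl, p, hp, h1, h2⟩
        · exact Or.inr ⟨r', Or.inr hr', hrest⟩
      · rintro (h | ⟨r', hr' | hr', p, hp, h1, h2⟩)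
        · exact Or.inl (Or.inl h)
        · subst hr'; exact Or.inl (Or.inr ⟨p, hp, h1, h2⟩)
        · exact Or.inr ⟨r', hr', p, hp, h1, h2⟩
  rw [main]
  constructor
  · rintro (h | ⟨r, hr, p, hp, h1, h2⟩)
    · simp [PySem.Set.empty] at h
    · exact ⟨p, hp, by rw [h1]; exact hr, h2⟩
  · rintro ⟨p, hp, h1, h2⟩
    exact Or.inr ⟨p.2, h1, p, hp, rfl, h2⟩

-- membership in enumerate
lemma mem_enumerate_iff (xs : List Int) (p : Int × Int) :
    ∀ s : Int, (p ∈ PySem.List.enumerate xs s ↔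
      ∃ k : Nat, k < xs.length ∧ p.1 = s + k ∧ p.2 = xs.getD k 0) := by
  induction xs with
  | nil => simp [PySem.List.enumerate]
  | cons x xs ih =>
    intro s
    rw [PySem.List.enumerate_cons]
    simp only [List.mem_cons, ih]
    constructor
    · rintro (h | ⟨k, hk, h1, h2⟩)
      · exact ⟨0, by simp, by simp [h], by simp [h]⟩
      · exact ⟨k + 1, by simpa using hk, by rw [h1]; push_cast; ring, by simpa using h2⟩
    · rintro ⟨k, hk, h1, h2⟩
      cases k with
      | zero =>
        left
        simp only [List.getD_cons_zero] at h2
        simp only [Nat.cast_zero, add_zero] at h1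
        exact Prod.ext h1 h2
      | succ k =>
        right
        refine ⟨k, by simpa using hk, by rw [h1]; push_cast; ring, by simpa using h2⟩

-- the children of the level-m set form exactly the level-(m+1) set
lemma children_levels {tree : List Int} {roots : PySem.Set Int} {m : Nat}
    (hroots : ∀ x, x ∈ roots ↔ levelp tree x m) :
    ∀ y, y ∈ depth2Children tree roots ↔ levelp tree y (m + 1) := by
  intro y
  rw [mem_children_iff]
  constructor
  · rintro ⟨p, hp, h1, h2⟩
    obtain ⟨k, hk, hp1, hp2⟩ := (mem_enumerate_iff tree p 0).mp hp
    subst h2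
    rw [hp1]
    have hy0 : (0:Int) ≤ (0:Int) + k := by positivity
    rw [levelp_succ]
    have hrange : 0 ≤ (0:Int) + (k:Int) ∧ (0:Int) + (k:Int) < tree.length := by
      constructor
      · positivity
      · omega
    constructor
    · omega
    · have : tstep tree ((0:Int) + k) = tree.getD k 0 := by
        rw [tstep, if_pos hrange]
        have : (0:Int) + (k:Int) = ((k:Nat) : Int) := by ring
        rw [this, PySem.List.pyGetD_natCast]
      rw [this, ← hp2]
      exact (hroots p.2).mp h1
  · intro hy
    have hrange := levelp_in_range hy (by omega)
    have hk : ∃ k : Nat, y = (k : Int) ∧ k < tree.length := by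
      refine ⟨y.toNat, by omega, by omega⟩
    obtain ⟨k, hyk, hklt⟩ := hk
    refine ⟨(y, tree.getD k 0), ?_, ?_, rfl⟩
    · rw [mem_enumerate_iff]
      exact ⟨k, hklt, by rw [hyk]; ring, rfl⟩
    · rw [hroots]
      have hts : tstep tree y = tree.getD k 0 := by
        rw [tstep, if_pos hrange, hyk, PySem.List.pyGetD_natCast]
      rw [← hts]
      exact ((levelp_succ.mp hy).2)

-- A's loop returns exactly the greatest nonempty level index
lemma loop_eq (tree : List Int) :
    ∀ (fuel m : Nat) (roots : PySem.Set Int) (result : Int),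
      (∀ x, x ∈ roots ↔ levelp tree x m) →
      maxLvl tree + 2 ≤ m + fuel →
      depth2Loop tree roots result fuel =
        if m ≤ maxLvl tree then result + ((maxLvl tree + 1 - m : Nat) : Int) else result := by
  intro fuel
  induction fuel with
  | zero =>
    intro m roots result hroots hfuel
    rw [if_neg (by omega)]
    rfl
  | succ fuel ih =>
    intro m roots result hroots hfuel
    by_cases hm : m ≤ maxLvl tree
    · obtain ⟨x, hx⟩ := S_of_le hm
      have hne : roots ≠ [] := by
        intro hnil
        have := (hroots x).mpr hx
        rw [hnil] at this
        simp at this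
      rw [depth2Loop, if_neg (by simpa [List.isEmpty_iff] using hne)]
      rw [ih (m + 1) _ _ (children_levels hroots) (by omega)]
      by_cases hm1 : m + 1 ≤ maxLvl tree
      · rw [if_pos hm1, if_pos hm]
        push_cast
        omega
      · rw [if_neg hm1, if_pos hm]
        have : maxLvl tree = m := by omega
        rw [this]
        omega
    · have hempty : roots = [] := by
        rw [List.eq_nil_iff_forall_not_mem]
        intro x hx
        exact not_S_of_gt (by omega) ⟨x, (hroots x).mp hx⟩
      rw [depth2Loop, if_pos (by simp [hempty]), if_neg hm]

-- A's result: the greatest nonempty level index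
lemma depth2_eq_maxLvl (tree : List Int) : depth2 tree = (maxLvl tree : Int) := by
  rw [depth2, loop_eq tree (tree.length + 2) 0 _ (-1) ?_ (by have := maxLvl_le tree; omega)]
  · rw [if_pos (Nat.zero_le _)]
    push_cast
    ring
  · intro x
    rw [levelp_zero]
    simp [PySem.Set.add, PySem.Set.empty, PySem.Set.contains]


lemma levelp_unique {tree : List Int} {x : Int} {k k' : Nat}
    (h : levelp tree x k) (h' : levelp tree x k') : k = k' := by
  by_contra hne
  rcases Nat.lt_or_ge k k' with hlt | hge
  · exact h'.2 k hlt h.1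
  · exact h.2 k' (by omega) h'.1

lemma exists_levelp_of_hit {tree : List Int} {x : Int} {m : Nat}
    (h : (tstep tree)^[m] x = -1) : ∃ k, levelp tree x k := by
  classical
  have hex : ∃ m, (tstep tree)^[m] x = -1 := ⟨m, h⟩
  refine ⟨@Nat.find _ (fun _ => Classical.dec _) hex, ?_, ?_⟩
  · exact @Nat.find_spec _ (fun _ => Classical.dec _) hex
  · intro j hj
    exact @Nat.find_min _ (fun _ => Classical.dec _) hex j hj

lemma no_levelp_iff {tree : List Int} {x : Int} :
    (¬ ∃ k, levelp tree x k) ↔ ∀ m, (tstep tree)^[m] x ≠ -1 := by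
  constructor
  · intro h m hm
    exact h (exists_levelp_of_hit hm)
  · rintro h ⟨k, hk⟩
    exact h k hk.1

-- if the chain from i runs through nonnegative nodes up to step L and from step L on never
-- reaches -1, it never reaches -1 at all
lemma chain_extend {tree : List Int} {i : Int} {L : Nat}
    (hq : ∀ j, j < L → 0 ≤ (tstep tree)^[j] i)
    (hc : ∀ m, (tstep tree)^[m] ((tstep tree)^[L] i) ≠ -1) :
    ∀ m, (tstep tree)^[m] i ≠ -1 := by
  intro m
  rcases Nat.lt_or_ge m L with hm | hm
  · have := hq m hm
    omega
  · have heq : (tstep tree)^[m] i = (tstep tree)^[m - L] ((tstep tree)^[L] i) := by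
      rw [← Function.iterate_add_apply]
      congr 1
      omega
    rw [heq]
    exact hc (m - L)

-- distinct in-range values make a list of length at most tree.length
lemma nodup_length_le {n : Nat} {q : List Int} (hnd : q.Nodup)
    (hin : ∀ y ∈ q, 0 ≤ y ∧ y < (n : Int)) : q.length ≤ n := by
  classical
  have h1 : q.toFinset.card = q.length := List.toFinset_card_of_nodup hnd
  have h2 : q.toFinset ⊆ Finset.Ico (0 : Int) n := by
    intro y hy
    rw [List.mem_toFinset] at hy
    rw [Finset.mem_Ico]
    exact hin y hy
  have := Finset.card_le_card h2
  rw [h1, Int.card_Ico] at this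
  omega

-- the facts carried along B's walk: the path is the iterate chain from i through in-range,
-- still-unknown nodes
def ChainProps (tree state : List Int) (i : Int) (q : List Int) : Prop :=
  ∀ j, j < q.length → q.getD j 0 = (tstep tree)^[j] i ∧
    0 ≤ q.getD j 0 ∧ q.getD j 0 < tree.length ∧
    PySem.List.pyGetD state (q.getD j 0) 0 = 0

lemma chain_mem_bounds {tree state : List Int} {i : Int} {q : List Int}
    (h : ChainProps tree state i q) : ∀ y ∈ q, 0 ≤ y ∧ y < (tree.length : Int) := by
  intro y hy
  obtain ⟨j, hj, hyj⟩ := List.mem_iff_getElem.mp hy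
  have := h j hj
  rw [List.getD_eq_getElem _ _ hj, hyj] at this
  exact ⟨this.2.1, this.2.2.1⟩

lemma walk_spec (tree state : List Int) (i : Int) :
    ∀ (fuel : Nat) (path : List Int) (seen : PySem.Set Int) (x : Int),
      path.length + fuel = tree.length + 1 →
      (∀ y : Int, y ∈ seen ↔ y ∈ path) →
      path.Nodup →
      ChainProps tree state i path →
      x = (tstep tree)^[path.length] i →
      ChainProps tree state i (depth2AltWalk tree state x path seen).2 ∧
      (depth2AltWalk tree state x path seen).2.Nodup ∧
      (depth2AltWalk tree state x path seen).1 =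
        (tstep tree)^[(depth2AltWalk tree state x path seen).2.length] i ∧
      ¬(0 ≤ (depth2AltWalk tree state x path seen).1 ∧
        (depth2AltWalk tree state x path seen).1 < tree.length ∧
        PySem.List.pyGetD state (depth2AltWalk tree state x path seen).1 0 = 0 ∧
        (depth2AltWalk tree state x path seen).1 ∉ (depth2AltWalk tree state x path seen).2) := by
  intro fuel
  induction fuel with
  | zero =>
    intro path seen x hlen hseen hnd hch hx
    have hb := nodup_length_le hnd (chain_mem_bounds hch)
    omega
  | succ fuel ih =>
    intro path seen x hlen hseen hnd hch hx
    rw [depth2AltWalk]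
    by_cases hg : 0 ≤ x ∧ x < tree.length ∧ PySem.List.pyGetD state x 0 = 0 ∧
        x ∉ seen ∧ path.length ≤ tree.length
    · rw [dif_pos hg]
      have hnotpath : x ∉ path := fun hmem => hg.2.2.2.1 ((hseen x).mpr hmem)
      have hxstep : PySem.List.pyGetD tree x 0 = (tstep tree)^[path.length + 1] i := by
        rw [Function.iterate_succ_apply', ← hx, tstep, if_pos ⟨hg.1, hg.2.1⟩]
      apply ih (path ++ [x]) (PySem.Set.add seen x) _
      · simp only [List.length_append, List.length_cons, List.length_nil]
        omega
      · intro y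
        rw [PySem.Set.mem_add, hseen y, List.mem_append, List.mem_singleton]
      · rw [List.nodup_append]
        refine ⟨hnd, List.nodup_singleton x, ?_⟩
        intro a ha b hb
        simp only [List.mem_singleton] at hb
        subst hb
        exact fun hax => hnotpath (hax ▸ ha)
      · intro j hj
        simp only [List.length_append, List.length_cons, List.length_nil] at hj
        rcases Nat.lt_or_ge j path.length with hjl | hjl
        · rw [List.getD_append path [x] 0 j hjl]
          exact hch j hjl
        · have hje : j = path.length := by omega
          subst hje
          have hget : (path ++ [x]).getD path.length 0 = x := by
            rw [List.getD_eq_getElem _ _ (by simp only [List.length_append, List.length_cons, List.length_nil]; omega)]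
            simp
          rw [hget]
          exact ⟨hx, hg.1, hg.2.1, hg.2.2.1⟩
      · simp only [List.length_append, List.length_cons, List.length_nil]
        rw [← hxstep]
    · rw [dif_neg hg]
      refine ⟨hch, hnd, hx, ?_⟩
      rintro ⟨h1, h2, h3, h4⟩
      apply hg
      refine ⟨h1, h2, h3, fun hmem => h4 ((hseen x).mp hmem), ?_⟩
      exact nodup_length_le hnd (chain_mem_bounds hch)

-- every node on the walk path has a level: the rest of the path and then the end's chain
lemma chain_levelp {tree state : List Int} {i c : Int} {q : List Int} {k : Nat}
    (hch : ChainProps tree state i q) (hc : c = (tstep tree)^[q.length] i)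
    (hk : levelp tree c k) :
    ∀ j, j < q.length → levelp tree (q.getD j 0) (q.length - j + k) := by
  intro j hj
  rw [(hch j hj).1]
  constructor
  · rw [← Function.iterate_add_apply]
    have he : q.length - j + k + j = k + q.length := by omega
    rw [he, Function.iterate_add_apply, ← hc]
    exact hk.1
  · intro m hm
    rw [← Function.iterate_add_apply]
    rcases Nat.lt_or_ge (m + j) q.length with hmj | hmj
    · have := (hch (m + j) hmj).2.1
      rw [(hch (m + j) hmj).1] at this
      omega
    · have he : m + j = (m + j - q.length) + q.length := by omega
      rw [he, Function.iterate_add_apply, ← hc]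
      exact hk.2 (m + j - q.length) (by omega)

-- a walk that closes a cycle never reaches -1
lemma cycle_no_hit {tree state : List Int} {i c : Int} {q : List Int}
    (hch : ChainProps tree state i q) (hc : c = (tstep tree)^[q.length] i)
    (hmem : c ∈ q) : ∀ m, (tstep tree)^[m] c ≠ -1 := by
  obtain ⟨j0, hj0, hcj0⟩ := List.mem_iff_getElem.mp hmem
  have horb : ∀ m, ∃ j, j < q.length ∧ (tstep tree)^[m] c = q.getD j 0 := by
    intro m
    induction m with
    | zero =>
      exact ⟨j0, hj0, by rw [Function.iterate_zero_apply, List.getD_eq_getElem _ _ hj0, hcj0]⟩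
    | succ m ihm =>
      obtain ⟨j, hj, hjq⟩ := ihm
      have hv : (tstep tree)^[m + 1] c = (tstep tree)^[j + 1] i := by
        rw [Function.iterate_succ_apply', hjq, (hch j hj).1]
        rw [Function.iterate_succ_apply']
      rcases Nat.lt_or_ge (j + 1) q.length with hj1 | hj1
      · exact ⟨j + 1, hj1, by rw [hv, (hch (j + 1) hj1).1]⟩
      · have he : j + 1 = q.length := by omega
        rw [he] at hv
        exact ⟨j0, hj0, by rw [hv, ← hc, List.getD_eq_getElem _ _ hj0, hcj0]⟩
  intro m
  obtain ⟨j, hj, hjq⟩ := horb m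
  have := (hch j hj).2.1
  omega

-- reading after a pySetD write at a nonnegative in-range position
lemma pyGetD_set_int (s : List Int) (node y v : Int) (hn0 : 0 ≤ node) (_hn1 : node < s.length)
    (hy0 : 0 ≤ y) (hy1 : y < s.length) :
    PySem.List.pyGetD (PySem.List.pySetD s node v) y 0 =
      if y = node then v else PySem.List.pyGetD s y 0 := by
  rw [PySem.List.pySetD_of_nonneg s v hn0]
  rw [PySem.List.pyGetD_eq_getElem _ 0 hy0 (by rw [List.length_set]; exact_mod_cast hy1)]
  rw [PySem.List.pyGetD_eq_getElem s 0 hy0 hy1]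
  rw [List.getElem_set]
  split_ifs with h1 h2 h2
  · rfl
  · exact absurd (by omega : y = node) h2
  · exact absurd (by omega : node.toNat = y.toNat) h1
  · rfl

-- the write-back loop with d = -1 marks every path node -1 and changes nothing else
lemma backfill_neg (p : List Int) :
    ∀ (state : List Int), (∀ y ∈ p, 0 ≤ y ∧ y < (state.length : Int)) →
    ((p.foldl (fun (sd : List Int × Int) node =>
        let d2 := if 0 ≤ sd.2 then sd.2 + 1 else sd.2
        (PySem.List.pySetD sd.1 node d2, d2)) (state, (-1 : Int))).1.length = state.length) ∧
    (∀ y : Int, 0 ≤ y → y < state.length → y ∉ p →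
      PySem.List.pyGetD ((p.foldl (fun (sd : List Int × Int) node =>
        let d2 := if 0 ≤ sd.2 then sd.2 + 1 else sd.2
        (PySem.List.pySetD sd.1 node d2, d2)) (state, (-1 : Int))).1) y 0 =
      PySem.List.pyGetD state y 0) ∧
    (∀ y ∈ p, PySem.List.pyGetD ((p.foldl (fun (sd : List Int × Int) node =>
        let d2 := if 0 ≤ sd.2 then sd.2 + 1 else sd.2
        (PySem.List.pySetD sd.1 node d2, d2)) (state, (-1 : Int))).1) y 0 = -1) := by
  induction p with
  | nil => intro state hb; exact ⟨rfl, fun y _ _ _ => rfl, fun y hy => absurd hy List.not_mem_nil⟩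
  | cons z rest ih =>
    intro state hb
    have hz := hb z (List.mem_cons_self)
    have hstep : ((z :: rest).foldl (fun (sd : List Int × Int) node =>
        let d2 := if 0 ≤ sd.2 then sd.2 + 1 else sd.2
        (PySem.List.pySetD sd.1 node d2, d2)) (state, (-1 : Int))) =
        (rest.foldl (fun (sd : List Int × Int) node =>
        let d2 := if 0 ≤ sd.2 then sd.2 + 1 else sd.2
        (PySem.List.pySetD sd.1 node d2, d2)) (PySem.List.pySetD state z (-1), (-1 : Int))) := by
      simp only [List.foldl_cons]
      norm_num
    rw [hstep]
    have hlen : (PySem.List.pySetD state z (-1)).length = state.length :=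
      PySem.List.length_pySetD state z (-1)
    have hb' : ∀ y ∈ rest, 0 ≤ y ∧ y < ((PySem.List.pySetD state z (-1)).length : Int) := by
      intro y hy
      rw [hlen]
      exact hb y (List.mem_cons_of_mem z hy)
    obtain ⟨ih1, ih2, ih3⟩ := ih (PySem.List.pySetD state z (-1)) hb'
    refine ⟨by rw [ih1, hlen], ?_, ?_⟩
    · intro y hy0 hy1 hyp
      have hyz : y ≠ z := fun he => hyp (he ▸ List.mem_cons_self)
      have hyr : y ∉ rest := fun he => hyp (List.mem_cons_of_mem z he)
      rw [ih2 y hy0 (by rw [hlen]; exact hy1) hyr]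
      rw [pyGetD_set_int state z y (-1) hz.1 hz.2 hy0 hy1, if_neg hyz]
    · intro y hy
      rcases List.mem_cons.mp hy with he | hyr
      · subst he
        by_cases hyr : y ∈ rest
        · exact ih3 y hyr
        · rw [ih2 y hz.1 (by rw [hlen]; exact hz.2) hyr]
          rw [pyGetD_set_int state y y (-1) hz.1 hz.2 hz.1 hz.2, if_pos rfl]
      · exact ih3 y hyr

-- the write-back loop with d ≥ 0 writes d + m + 1 at position m of the (duplicate-free) path
lemma backfill_pos (p : List Int) :
    ∀ (state : List Int) (d0 : Int), 0 ≤ d0 → p.Nodup →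
    (∀ y ∈ p, 0 ≤ y ∧ y < (state.length : Int)) →
    ((p.foldl (fun (sd : List Int × Int) node =>
        let d2 := if 0 ≤ sd.2 then sd.2 + 1 else sd.2
        (PySem.List.pySetD sd.1 node d2, d2)) (state, d0)).1.length = state.length) ∧
    (∀ y : Int, 0 ≤ y → y < state.length → y ∉ p →
      PySem.List.pyGetD ((p.foldl (fun (sd : List Int × Int) node =>
        let d2 := if 0 ≤ sd.2 then sd.2 + 1 else sd.2
        (PySem.List.pySetD sd.1 node d2, d2)) (state, d0)).1) y 0 =
      PySem.List.pyGetD state y 0) ∧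
    (∀ m, m < p.length →
      PySem.List.pyGetD ((p.foldl (fun (sd : List Int × Int) node =>
        let d2 := if 0 ≤ sd.2 then sd.2 + 1 else sd.2
        (PySem.List.pySetD sd.1 node d2, d2)) (state, d0)).1) (p.getD m 0) 0 = d0 + m + 1) := by
  induction p with
  | nil =>
    intro state d0 _ _ _
    exact ⟨rfl, fun y _ _ _ => rfl, fun m hm => absurd hm (by simp)⟩
  | cons z rest ih =>
    intro state d0 hd0 hnd hb
    have hz := hb z (List.mem_cons_self)
    have hstep : ((z :: rest).foldl (fun (sd : List Int × Int) node =>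
        let d2 := if 0 ≤ sd.2 then sd.2 + 1 else sd.2
        (PySem.List.pySetD sd.1 node d2, d2)) (state, d0)) =
        (rest.foldl (fun (sd : List Int × Int) node =>
        let d2 := if 0 ≤ sd.2 then sd.2 + 1 else sd.2
        (PySem.List.pySetD sd.1 node d2, d2)) (PySem.List.pySetD state z (d0 + 1), d0 + 1)) := by
      simp only [List.foldl_cons, if_pos hd0]
    rw [hstep]
    have hlen : (PySem.List.pySetD state z (d0 + 1)).length = state.length :=
      PySem.List.length_pySetD state z (d0 + 1)
    have hznr : z ∉ rest := (List.nodup_cons.mp hnd).1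
    have hb' : ∀ y ∈ rest, 0 ≤ y ∧ y < ((PySem.List.pySetD state z (d0 + 1)).length : Int) := by
      intro y hy
      rw [hlen]
      exact hb y (List.mem_cons_of_mem z hy)
    obtain ⟨ih1, ih2, ih3⟩ := ih (PySem.List.pySetD state z (d0 + 1)) (d0 + 1) (by omega)
      (List.nodup_cons.mp hnd).2 hb'
    refine ⟨by rw [ih1, hlen], ?_, ?_⟩
    · intro y hy0 hy1 hyp
      have hyz : y ≠ z := fun he => hyp (he ▸ List.mem_cons_self)
      have hyr : y ∉ rest := fun he => hyp (List.mem_cons_of_mem z he)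
      rw [ih2 y hy0 (by rw [hlen]; exact hy1) hyr]
      rw [pyGetD_set_int state z y (d0 + 1) hz.1 hz.2 hy0 hy1, if_neg hyz]
    · intro m hm
      cases m with
      | zero =>
        have hzget : (z :: rest).getD 0 0 = z := rfl
        rw [hzget]
        rw [ih2 z hz.1 (by rw [hlen]; exact hz.2) hznr]
        rw [pyGetD_set_int state z z (d0 + 1) hz.1 hz.2 hz.1 hz.2, if_pos rfl]
        omega
      | succ m =>
        have hget : (z :: rest).getD (m + 1) 0 = rest.getD m 0 := rfl
        rw [hget]
        have := ih3 m (by simpa using hm)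
        rw [this]
        push_cast
        ring

-- memo-state invariant: every entry is unknown (0), proven unreachable (-1), or the node's depth
def Good (tree state : List Int) : Prop :=
  ∀ y : Int, 0 ≤ y → y < tree.length →
    PySem.List.pyGetD state y 0 = 0 ∨
    (PySem.List.pyGetD state y 0 = -1 ∧ ∀ k, ¬ levelp tree y k) ∨
    (0 < PySem.List.pyGetD state y 0 ∧ levelp tree y (PySem.List.pyGetD state y 0).toNat)

lemma getD_reverse (q : List Int) (m : Nat) (hm : m < q.length) :
    q.reverse.getD m 0 = q.getD (q.length - 1 - m) 0 := by
  rw [List.getD_eq_getElem _ _ (by simpa using hm), List.getD_eq_getElem _ _ (by omega),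
    List.getElem_reverse]

lemma body_spec (tree : List Int) (sb : List Int × Int) (i : Nat)
    (hg : Good tree sb.1) (hlen : sb.1.length = tree.length) (hi : i < tree.length) :
    Good tree (depth2AltBody tree sb i).1 ∧
    (depth2AltBody tree sb i).1.length = tree.length ∧
    (∀ k, levelp tree (i : Int) k → (depth2AltBody tree sb i).2 = max sb.2 (k : Int)) ∧
    ((¬ ∃ k, levelp tree (i : Int) k) → (depth2AltBody tree sb i).2 = sb.2) := by
  obtain ⟨Hch, Hnd, Hc, Hexit⟩ := walk_spec tree sb.1 (i : Int) (tree.length + 1) [] PySem.Set.empty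
    (i : Int) (by simp) (by intro y; rfl) List.nodup_nil (fun j hj => absurd hj (by simp)) rfl
  set w := depth2AltWalk tree sb.1 (i : Int) [] PySem.Set.empty with hwdef
  set D : Int := (if w.1 = -1 then 0
    else if 0 ≤ w.1 ∧ w.1 < tree.length ∧ 0 < PySem.List.pyGetD sb.1 w.1 0 then
      PySem.List.pyGetD sb.1 w.1 0
    else -1) with hDdef
  set ST : List Int := (w.2.reverse.foldl (fun (sd : List Int × Int) node =>
      let d2 := if 0 ≤ sd.2 then sd.2 + 1 else sd.2
      (PySem.List.pySetD sd.1 node d2, d2)) (sb.1, D)).1 with hSTdef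
  have hb1 : (depth2AltBody tree sb i).1 = ST := rfl
  have hb2 : (depth2AltBody tree sb i).2 =
      if 0 < PySem.List.pyGetD ST (i : Int) 0 then max sb.2 (PySem.List.pyGetD ST (i : Int) 0)
      else sb.2 := rfl
  have hqb : ∀ y ∈ w.2, 0 ≤ y ∧ y < (sb.1.length : Int) := by
    intro y hy
    have := chain_mem_bounds Hch y hy
    omega
  have hqrb : ∀ y ∈ w.2.reverse, 0 ≤ y ∧ y < (sb.1.length : Int) := by
    intro y hy
    exact hqb y (List.mem_reverse.mp hy)
  -- positive or negative ending?
  by_cases hpos : w.1 = -1 ∨ (0 ≤ w.1 ∧ w.1 < tree.length ∧ 0 < PySem.List.pyGetD sb.1 w.1 0)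
  · -- the walk ended at -1 or at a node with a memoized depth: D = that depth
    have hkex : ∃ k : Nat, levelp tree w.1 k ∧ D = (k : Int) := by
      rcases hpos with he | hmemo
      · exact ⟨0, levelp_zero.mpr he, by rw [hDdef, if_pos he]; simp⟩
      · have hne : ¬ w.1 = -1 := by omega
        have := hg w.1 hmemo.1 hmemo.2.1
        rcases this with h0 | ⟨hm1, _⟩ | ⟨hgt, hlev⟩
        · omega
        · omega
        · refine ⟨(PySem.List.pyGetD sb.1 w.1 0).toNat, hlev, ?_⟩
          rw [hDdef, if_neg hne, if_pos hmemo]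
          omega
    obtain ⟨k, hkc, hDk⟩ := hkex
    have hD0 : 0 ≤ D := by omega
    obtain ⟨hbl, hbout, hbval⟩ := backfill_pos w.2.reverse sb.1 D hD0
      (List.nodup_reverse.mpr Hnd) hqrb
    rw [← hSTdef] at hbl hbout hbval
    -- value written at each path node is its level
    have hstq : ∀ j, j < w.2.length →
        PySem.List.pyGetD ST (w.2.getD j 0) 0 = ((w.2.length - j + k : Nat) : Int) := by
      intro j hj
      have hm : w.2.length - 1 - j < w.2.reverse.length := by
        rw [List.length_reverse]; omega
      have := hbval (w.2.length - 1 - j) hm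
      rw [getD_reverse _ _ (by rw [List.length_reverse] at hm; exact hm)] at this
      have hjj : w.2.length - 1 - (w.2.length - 1 - j) = j := by omega
      rw [hjj] at this
      rw [this, hDk]
      push_cast
      omega
    have hlevq : ∀ j, j < w.2.length → levelp tree (w.2.getD j 0) (w.2.length - j + k) :=
      chain_levelp Hch Hc hkc
    have hGood : Good tree ST := by
      intro y hy0 hy1
      by_cases hyq : y ∈ w.2
      · obtain ⟨j, hj, hyj⟩ := List.mem_iff_getElem.mp hyq
        have hydj : w.2.getD j 0 = y := by rw [List.getD_eq_getElem _ _ hj, hyj]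
        right; right
        rw [← hydj]
        rw [hstq j hj]
        constructor
        · push_cast
          omega
        · have := hlevq j hj
          simpa using this
      · rw [hbout y hy0 (by omega) (fun hm => hyq (List.mem_reverse.mp hm))]
        exact hg y hy0 hy1
    -- the value recorded for i
    have hlevi : ∃ ki : Nat, levelp tree (i : Int) ki ∧ PySem.List.pyGetD ST (i : Int) 0 = (ki : Int) := by
      by_cases hL : w.2.length = 0
      · have hqnil : w.2 = [] := List.length_eq_zero_iff.mp hL
        have hci : w.1 = (i : Int) := by rw [Hc, hL]; simp
        have hSTeq : ST = sb.1 := by rw [hSTdef, hqnil]; rfl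
        refine ⟨k, by rw [← hci]; exact hkc, ?_⟩
        rcases hpos with he | hm
        · rw [hci] at he; omega
        · have hDm : D = PySem.List.pyGetD sb.1 w.1 0 := by
            rw [hDdef, if_neg (by rw [hci]; omega), if_pos hm]
          rw [hSTeq, ← hci, ← hDm, hDk]
      · have hq0 : w.2.getD 0 0 = (i : Int) := by
          have := (Hch 0 (by omega)).1
          simpa using this
        refine ⟨w.2.length + k, ?_, ?_⟩
        · have := hlevq 0 (by omega)
          rw [hq0] at this
          simpa using this
        · have := hstq 0 (by omega)
          rw [hq0] at this
          rw [this]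
          push_cast
          omega
    obtain ⟨ki, hki, hsti⟩ := hlevi
    have hki1 : 1 ≤ ki := by
      rcases Nat.eq_zero_or_pos ki with h0 | h1
      · subst h0
        have := levelp_zero.mp hki
        omega
      · exact h1
    refine ⟨hb1 ▸ hGood, by rw [hb1, hbl, hlen], ?_, ?_⟩
    · intro k' hk'
      have : k' = ki := levelp_unique hk' hki
      subst this
      rw [hb2, hsti, if_pos (by omega)]
    · intro hnex
      exact absurd ⟨ki, hki⟩ hnex
  · -- dead end: junk parent, cycle, or known-unreachable node; D = -1
    obtain ⟨h1, h2⟩ := not_or.mp hpos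
    have hDn : D = -1 := by
      rw [hDdef, if_neg h1, if_neg h2]
    have hnohit : ∀ m, (tstep tree)^[m] w.1 ≠ -1 := by
      by_cases hcr : 0 ≤ w.1 ∧ w.1 < (tree.length : Int)
      · by_cases hcq : w.1 ∈ w.2
        · exact cycle_no_hit Hch Hc hcq
        · have hs0 : PySem.List.pyGetD sb.1 w.1 0 ≠ 0 := by
            intro h0
            exact Hexit ⟨hcr.1, hcr.2, h0, hcq⟩
          rcases hg w.1 hcr.1 hcr.2 with h0 | ⟨_, hnl⟩ | ⟨hgt, _⟩
          · exact absurd h0 hs0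
          · exact no_levelp_iff.mp (fun hex => hnl hex.choose hex.choose_spec)
          · exact absurd ⟨hcr.1, hcr.2, hgt⟩ h2
      · intro m hh
        rw [iterate_out hcr m] at hh
        exact h1 hh
    have hnohiti : ∀ m, (tstep tree)^[m] (i : Int) ≠ -1 := by
      apply chain_extend (L := w.2.length)
      · intro j hj
        have := (Hch j hj).2.1
        rw [(Hch j hj).1] at this
        exact this
      · rw [← Hc]; exact hnohit
    have hnoq : ∀ y ∈ w.2, ∀ km, ¬ levelp tree y km := by
      intro y hy km hkm
      obtain ⟨j, hj, hyj⟩ := List.mem_iff_getElem.mp hy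
      have hydj : y = (tstep tree)^[j] (i : Int) := by
        rw [← hyj, ← List.getD_eq_getElem _ _ hj, (Hch j hj).1]
      have := hkm.1
      rw [hydj, ← Function.iterate_add_apply] at this
      exact hnohiti (km + j) this
    rw [hDn] at hSTdef
    obtain ⟨hbl, hbout, hbval⟩ := backfill_neg w.2.reverse sb.1 hqrb
    rw [← hSTdef] at hbl hbout hbval
    have hGood : Good tree ST := by
      intro y hy0 hy1
      by_cases hyq : y ∈ w.2
      · right; left
        exact ⟨hbval y (List.mem_reverse.mpr hyq), hnoq y hyq⟩
      · rw [hbout y hy0 (by omega) (fun hm => hyq (List.mem_reverse.mp hm))]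
        exact hg y hy0 hy1
    have hsti : PySem.List.pyGetD ST (i : Int) 0 = -1 := by
      by_cases hL : w.2.length = 0
      · have hqnil : w.2 = [] := List.length_eq_zero_iff.mp hL
        have hci : w.1 = (i : Int) := by rw [Hc, hL]; simp
        have hSTeq : ST = sb.1 := by rw [hSTdef, hqnil]; rfl
        have hs0 : PySem.List.pyGetD sb.1 (i : Int) 0 ≠ 0 := by
          intro h0
          exact Hexit ⟨by rw [hci]; positivity, by rw [hci]; exact_mod_cast hi,
            by rw [hci]; exact h0, by rw [hqnil]; exact List.not_mem_nil⟩
        rcases hg (i : Int) (by positivity) (by exact_mod_cast hi) with h0 | ⟨hm1, _⟩ | ⟨hgt, hlev⟩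
        · exact absurd h0 hs0
        · rw [hSTeq]; exact hm1
        · exact absurd hlev.1 (hnohiti _)
      · have hq0 : w.2.getD 0 0 = (i : Int) := by
          have := (Hch 0 (by omega)).1
          simpa using this
        have hmem : (i : Int) ∈ w.2 := by
          rw [← hq0, List.getD_eq_getElem _ _ (by omega)]
          exact List.getElem_mem _
        exact hbval (i : Int) (List.mem_reverse.mpr hmem)
    refine ⟨hb1 ▸ hGood, by rw [hb1, hbl, hlen], ?_, ?_⟩
    · intro k' hk'
      exact absurd hk'.1 (hnohiti k')
    · intro _
      rw [hb2, hsti, if_neg (by omega)]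

-- the loop over the nodes keeps the memo sound and the running best below the answer
lemma fold_le (tree : List Int) :
    ∀ (l : List Nat) (sb : List Int × Int), Good tree sb.1 → sb.1.length = tree.length →
      (∀ j ∈ l, j < tree.length) → sb.2 ≤ (maxLvl tree : Int) →
      (l.foldl (depth2AltBody tree) sb).2 ≤ (maxLvl tree : Int) := by
  intro l
  induction l with
  | nil => intro sb _ _ _ h; exact h
  | cons j l ih =>
    intro sb hgood hlen hmem hb
    obtain ⟨hG, hL, hpos, hneg⟩ := body_spec tree sb j hgood hlen (hmem j List.mem_cons_self)
    rw [List.foldl_cons]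
    apply ih _ hG hL (fun j' hj' => hmem j' (List.mem_cons_of_mem j hj'))
    by_cases hex : ∃ k, levelp tree (j : Int) k
    · obtain ⟨k, hk⟩ := hex
      rw [hpos k hk]
      have : k ≤ maxLvl tree := S_le ⟨(j : Int), hk⟩
      simp only [max_le_iff]
      constructor
      · exact hb
      · omega
    · rw [hneg hex]
      exact hb

lemma fold_ge_init (tree : List Int) :
    ∀ (l : List Nat) (sb : List Int × Int), Good tree sb.1 → sb.1.length = tree.length →
      (∀ j ∈ l, j < tree.length) → sb.2 ≤ (l.foldl (depth2AltBody tree) sb).2 := by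
  intro l
  induction l with
  | nil => intro sb _ _ _; exact le_refl _
  | cons j l ih =>
    intro sb hgood hlen hmem
    obtain ⟨hG, hL, hpos, hneg⟩ := body_spec tree sb j hgood hlen (hmem j List.mem_cons_self)
    rw [List.foldl_cons]
    refine le_trans ?_ (ih _ hG hL (fun j' hj' => hmem j' (List.mem_cons_of_mem j hj')))
    by_cases hex : ∃ k, levelp tree (j : Int) k
    · obtain ⟨k, hk⟩ := hex
      rw [hpos k hk]
      exact le_max_left _ _
    · rw [hneg hex]

lemma fold_ge_mem (tree : List Int) :
    ∀ (l : List Nat) (sb : List Int × Int), Good tree sb.1 → sb.1.length = tree.length →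
      (∀ j ∈ l, j < tree.length) → ∀ j0 ∈ l, ∀ k0, levelp tree (j0 : Int) k0 →
      (k0 : Int) ≤ (l.foldl (depth2AltBody tree) sb).2 := by
  intro l
  induction l with
  | nil => intro sb _ _ _ j0 hj0; exact absurd hj0 List.not_mem_nil
  | cons j l ih =>
    intro sb hgood hlen hmem j0 hj0 k0 hk0
    obtain ⟨hG, hL, hpos, hneg⟩ := body_spec tree sb j hgood hlen (hmem j List.mem_cons_self)
    rw [List.foldl_cons]
    rcases List.mem_cons.mp hj0 with he | hj0l
    · subst he
      refine le_trans ?_ (fold_ge_init tree l _ hG hL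
        (fun j' hj' => hmem j' (List.mem_cons_of_mem j0 hj')))
      rw [hpos k0 hk0]
      exact le_max_right _ _
    · exact ih _ hG hL (fun j' hj' => hmem j' (List.mem_cons_of_mem j hj')) j0 hj0l k0 hk0

-- B's result: the greatest nonempty level index
lemma depth2_alt_eq_maxLvl (tree : List Int) : depth2_alt tree = (maxLvl tree : Int) := by
  have hgood : Good tree (List.replicate tree.length (0 : Int)) := by
    intro y hy0 hy1
    left
    rw [PySem.List.pyGetD_eq_getElem _ 0 hy0 (by rw [List.length_replicate]; exact hy1)]
    exact List.getElem_replicate _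
  have hlen : (List.replicate tree.length (0 : Int)).length = tree.length :=
    List.length_replicate
  have hmem : ∀ j ∈ List.range tree.length, j < tree.length := fun j hj => List.mem_range.mp hj
  rw [depth2_alt]
  apply le_antisymm
  · exact fold_le tree _ _ hgood hlen hmem (by positivity)
  · rcases Nat.eq_zero_or_pos (maxLvl tree) with h0 | hpos
    · rw [h0]
      exact le_trans (by norm_num) (fold_ge_init tree _ _ hgood hlen hmem)
    · obtain ⟨x, hx⟩ := S_maxLvl tree
      have hrange := levelp_in_range hx hpos
      have hxc : ((x.toNat : Nat) : Int) = x := by omega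
      have hxm : x.toNat ∈ List.range tree.length := by
        rw [List.mem_range]
        omega
      exact fold_ge_mem tree _ _ hgood hlen hmem x.toNat hxm (maxLvl tree) (by rwa [hxc])

-- ===== VERDICT (by name: the statement is the Claim_ definition above) =====
theorem depth2_spec : Claim_equal_depth2 := by
  intro tree _
  unfold Spec_depth2
  rw [depth2_eq_maxLvl, depth2_alt_eq_maxLvl]
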